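-- pv_equiv track=rewrite | github.com/valexeichik/Algorithms | string_algs/4_palindromes.py | manacher_even
-- ===== SOURCE A (Python) =====
-- def manacher_even(string, n):
--     d = [0] * n
--     l, r = 0, -1
--     for i in range(n):
--         if i <= r:
--             d[i] = min(r - i + 1, d[l + r - i + 1])
--         while i - d[i] - 1 >= 0 and i + d[i] < n and string[i - d[i] - 1] == string[i + d[i]]:
--             d[i] += 1
--         if i + d[i] - 1 > r:
--             l, r = i - d[i], i + d[i] - 1
--     return d
-- ===== SOURCE B (Python) =====
-- def manacher_even(string, n):
--     # The even radius at center i is the length of the common prefix of the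
--     # reversed left part string[:i] and the right part string[i:n]: count
--     # matching leading pairs of the two slices instead of maintaining the
--     # rightmost-palindrome (l, r) box.
--     out = []
--     for i in range(n):
--         k = 0
--         for a, b in zip(reversed(string[:i]), string[i:n]):
--             if a != b:
--                 break
--             k += 1
--         out.append(k)
--     return out
-- ===== Notes on version B (the rewrite author's own statement) =====
-- stated objective: alternative
-- what changed: Replaces Manacher's rightmost-palindrome (l, r) interval reuse with an independent per-center computation: the radius at i is the length of the common prefix of the reversed slice string[:i] and the slice string[i:n], counted by a single zip scan.
-- outside the precondition, e.g. on manacher_even('', 1): A returns [0], B returns [0]; on manacher_even('a', 2): A raises IndexError, B returns [0, 0]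
import Mathlib
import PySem

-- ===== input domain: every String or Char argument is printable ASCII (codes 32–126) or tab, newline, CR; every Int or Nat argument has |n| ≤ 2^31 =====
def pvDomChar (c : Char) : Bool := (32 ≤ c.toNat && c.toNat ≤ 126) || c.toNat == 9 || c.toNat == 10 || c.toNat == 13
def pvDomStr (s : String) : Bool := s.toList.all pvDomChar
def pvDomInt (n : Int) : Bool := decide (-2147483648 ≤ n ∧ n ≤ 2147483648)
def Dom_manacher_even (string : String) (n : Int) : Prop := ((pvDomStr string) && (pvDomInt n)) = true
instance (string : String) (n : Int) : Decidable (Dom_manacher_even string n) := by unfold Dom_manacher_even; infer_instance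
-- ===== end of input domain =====

-- B drops Manacher's (l, r) interval reuse: at each center i it counts the matching
-- leading pairs of reversed(string[:i]) and string[i:n] (no speed claim; same array).

-- ===== PORT A =====
-- A's while loop: "while i - d - 1 >= 0 and i + d < n and string[i-d-1] == string[i+d]: d += 1"
-- (character indices are in range under Pre_ (0 ≤ idx < n ≤ length), so getD is exact there)
def pvCond (cs : List Char) (n i d : Int) : Bool :=
  decide (i - d - 1 ≥ 0) && decide (i + d < n) &&
    (cs.getD (i - d - 1).toNat ' ' == cs.getD (i + d).toNat ' ')

def pvExpand (cs : List Char) (n i d : Int) : Int :=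
  if h : pvCond cs n i d = true then pvExpand cs n i (d + 1) else d
termination_by (n - i - d).toNat
decreasing_by
  simp [pvCond] at h; omega

-- one iteration of A's for-loop; state = (d, l, r)
def pvStepA (cs : List Char) (n : Int) (st : List Int × Int × Int) (i : Int) :
    List Int × Int × Int :=
  let d := st.1; let l := st.2.1; let r := st.2.2
  -- d[i] = min(r-i+1, d[l+r-i+1]) when i <= r, else d[i] stays as read
  let v := if i ≤ r then min (r - i + 1) ((PySem.List.pyGet? d (l + r - i + 1)).getD 0)
           else (PySem.List.pyGet? d i).getD 0
  let v' := pvExpand cs n i v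
  let d' := d.set i.toNat v'   -- i ≥ 0 (from range(n)), so toNat is exact
  if i + v' - 1 > r then (d', i - v', i + v' - 1) else (d', l, r)

def manacher_even (string : String) (n : Int) : List Int :=
  ((PySem.List.pyRange 0 n 1).foldl (pvStepA string.toList n)
    (List.replicate n.toNat 0, 0, -1)).1

-- ===== PORT B =====
-- Source B's inner zip scan: count the matching leading pairs of two lists
def pvCount : List Char → List Char → Int
  | a :: as, b :: bs => if a == b then 1 + pvCount as bs else 0
  | _, _ => 0

-- for i in range(n): count over zip(reversed(string[:i]), string[i:n])
def manacher_even_alt (string : String) (n : Int) : List Int :=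
  (PySem.List.pyRange 0 n 1).map (fun i =>
    pvCount (PySem.List.slice string.toList none (some i)).reverse
            (PySem.List.slice string.toList (some i) (some n)))

-- ===== PRECONDITION & SPEC =====
-- Pre_ excludes n > len(string): there A indexes string[i] past its end and raises
-- IndexError whenever any comparison is reached (exactly when n ≥ 2); on the only
-- remaining excluded shape ("", 1) both programs return [0] anyway.
def Pre_manacher_even (string : String) (n : Int) : Prop :=
  n ≤ (string.toList.length : Int)
instance (string : String) (n : Int) : Decidable (Pre_manacher_even string n) := by
  unfold Pre_manacher_even; infer_instance
def pvWitness_manacher_even : String × Int := ("abba", 4)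

def Spec_manacher_even (string : String) (n : Int) (out : List Int) : Prop := out = manacher_even_alt string n
instance (string : String) (n : Int) (out : List Int) : Decidable (Spec_manacher_even string n out) := by unfold Spec_manacher_even; infer_instance

-- ===== CLAIM (what is proved, stated in full; the proofs are below) =====
def Claim_equal_manacher_even : Prop := ∀ (string : String) (n : Int), Dom_manacher_even string n → Pre_manacher_even string n → Spec_manacher_even string n (manacher_even string n)

-- ===== LEMMAS AND PROOFS =====

-- the radius at center i
def pvR (cs : List Char) (n i : Int) : Int := pvExpand cs n i 0

theorem pvExpand_ge (cs : List Char) (n i : Int) : ∀ d, d ≤ pvExpand cs n i d := by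
  intro d
  induction d using pvExpand.induct cs n i with
  | case1 d h ih => rw [pvExpand]; simp [h]; omega
  | case2 d h => rw [pvExpand]; simp [h]

theorem pvExpand_cond_lt (cs : List Char) (n i : Int) :
    ∀ d k, d ≤ k → k < pvExpand cs n i d → pvCond cs n i k = true := by
  intro d
  induction d using pvExpand.induct cs n i with
  | case1 d h ih =>
    intro k hk1 hk2
    rcases eq_or_lt_of_le hk1 with rfl | hlt
    · exact h
    · rw [pvExpand] at hk2; simp [h] at hk2; exact ih k (by omega) hk2
  | case2 d h =>
    intro k hk1 hk2
    rw [pvExpand] at hk2; simp [h] at hk2; omega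

theorem pvExpand_cond_stop (cs : List Char) (n i : Int) :
    ∀ d, pvCond cs n i (pvExpand cs n i d) = false := by
  intro d
  induction d using pvExpand.induct cs n i with
  | case1 d h ih => rw [pvExpand]; simp [h]; exact ih
  | case2 d h => rw [pvExpand]; simp [h]

-- expanding from any start v with 0 ≤ v ≤ R gives R
theorem pvExpand_absorb_aux (cs : List Char) (n i : Int) :
    ∀ (m : ℕ) (v : Int), 0 ≤ v → v ≤ pvR cs n i → (pvR cs n i - v).toNat = m →
      pvExpand cs n i v = pvR cs n i := by
  intro m
  induction m with
  | zero =>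
    intro v hv0 hvR hm
    have hv : v = pvR cs n i := by omega
    have hstop : pvCond cs n i (pvR cs n i) = false := pvExpand_cond_stop cs n i 0
    subst hv
    rw [pvExpand]
    simp [hstop]
  | succ m ih =>
    intro v hv0 hvR hm
    have hlt : v < pvR cs n i := by omega
    have hcond : pvCond cs n i v = true := pvExpand_cond_lt cs n i 0 v hv0 hlt
    rw [pvExpand]
    simp only [hcond, dite_true]
    exact ih (v + 1) (by omega) (by omega) (by omega)

theorem pvExpand_absorb (cs : List Char) (n i : Int)
    (v : Int) (hv0 : 0 ≤ v) (hvR : v ≤ pvR cs n i) : pvExpand cs n i v = pvR cs n i :=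
  pvExpand_absorb_aux cs n i _ v hv0 hvR rfl

-- maximality: if all offsets below v satisfy the condition, v ≤ R
theorem pvR_max (cs : List Char) (n i v : Int)
    (h : ∀ k, 0 ≤ k → k < v → pvCond cs n i k = true) : v ≤ pvR cs n i := by
  by_contra hc
  push Not at hc
  have h0 : (0:Int) ≤ pvR cs n i := pvExpand_ge cs n i 0
  have hstop : pvCond cs n i (pvR cs n i) = false := pvExpand_cond_stop cs n i 0
  have := h (pvR cs n i) h0 hc
  rw [hstop] at this
  exact absurd this (by simp)

theorem pvR_nonneg (cs : List Char) (n i : Int) : 0 ≤ pvR cs n i := pvExpand_ge cs n i 0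

theorem pvCond_iff (cs : List Char) (n i k : Int) :
    pvCond cs n i k = true ↔
      0 ≤ i - k - 1 ∧ i + k < n ∧ cs.getD (i - k - 1).toNat ' ' = cs.getD (i + k).toNat ' ' := by
  unfold pvCond
  simp only [Bool.and_eq_true, decide_eq_true_eq, beq_iff_eq]
  constructor
  · rintro ⟨⟨h1, h2⟩, h3⟩; exact ⟨by omega, h2, h3⟩
  · rintro ⟨h1, h2, h3⟩; exact ⟨⟨by omega, h2⟩, h3⟩

theorem pvR_left (cs : List Char) (n i : Int) (hi : 0 ≤ i) : pvR cs n i ≤ i := by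
  unfold pvR
  rcases eq_or_lt_of_le (show (0:Int) ≤ pvExpand cs n i 0 from pvR_nonneg cs n i) with h0 | h0
  · omega
  · have hc := pvExpand_cond_lt cs n i 0 (pvExpand cs n i 0 - 1) (by omega) (by omega)
    rw [pvCond_iff] at hc
    omega

theorem pvR_right (cs : List Char) (n i : Int) (hi : i < n) : i + pvR cs n i ≤ n := by
  unfold pvR
  rcases eq_or_lt_of_le (show (0:Int) ≤ pvExpand cs n i 0 from pvR_nonneg cs n i) with h0 | h0
  · omega
  · have hc := pvExpand_cond_lt cs n i 0 (pvExpand cs n i 0 - 1) (by omega) (by omega)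
    rw [pvCond_iff] at hc
    omega

theorem pvR_cond (cs : List Char) (n i k : Int) (hk0 : 0 ≤ k) (hk : k < pvR cs n i) :
    pvCond cs n i k = true :=
  pvExpand_cond_lt cs n i 0 k hk0 hk

-- the loop invariant for A's fold, after the iterations i = 0 … m-1 (m ≤ n)
def pvInv (cs : List Char) (n : Int) (m : ℕ) (st : List Int × Int × Int) : Prop :=
  st.1.length = n.toNat ∧
  (∀ j : ℕ, j < n.toNat → st.1.getD j 0 = if (j : Int) < (m : Int) then pvR cs n j else 0) ∧
  0 ≤ st.2.1 ∧ st.2.2 < n ∧ st.2.1 + st.2.2 ≤ 2 * (m : Int) - 1 ∧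
  (∀ p q : Int, st.2.1 ≤ p → p ≤ q → q ≤ st.2.2 → p + q = st.2.1 + st.2.2 →
    cs.getD p.toNat ' ' = cs.getD q.toNat ' ')

-- A's fold state after iterations 0 … m-1
def pvStateAt (cs : List Char) (n : Int) (m : ℕ) : List Int × Int × Int :=
  (PySem.List.pyRange 0 (m : Int) 1).foldl (pvStepA cs n) (List.replicate n.toNat 0, 0, -1)

theorem pvStateAt_succ (cs : List Char) (n : Int) (m : ℕ) :
    pvStateAt cs n (m + 1) = pvStepA cs n (pvStateAt cs n m) (m : Int) := by
  unfold pvStateAt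
  have : ((m + 1 : ℕ) : Int) = (m : Int) + 1 := by push_cast; ring
  rw [this, PySem.List.pyRange_one_succ_right (by positivity), List.foldl_append]
  rfl

-- one iteration of A preserves the invariant and writes exactly the radius pvR
theorem pvInv_step (cs : List Char) (n : Int) (m : ℕ) (hm : (m : Int) < n)
    (d : List Int) (l r : Int) (h : pvInv cs n m (d, l, r)) :
    pvInv cs n (m + 1) (pvStepA cs n (d, l, r) (m : Int)) := by
  obtain ⟨hlen, hent, hl0, hrn, hlr, hpal⟩ := h
  simp only at hlen hent hl0 hrn hlr hpal
  set i : Int := (m : Int) with hidef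
  have hi0 : (0:Int) ≤ i := by positivity
  have hpal' : ∀ p q : Int, l ≤ p → p ≤ r → l ≤ q → q ≤ r → p + q = l + r →
      cs.getD p.toNat ' ' = cs.getD q.toNat ' ' := by
    intro p q hp1 hp2 hq1 hq2 hs
    rcases le_total p q with hle | hle
    · exact hpal p q hp1 hle hq2 hs
    · exact (hpal q p hq1 hle hp2 (by omega)).symm
  set v : Int := (if i ≤ r then min (r - i + 1) ((PySem.List.pyGet? d (l + r - i + 1)).getD 0)
                 else (PySem.List.pyGet? d i).getD 0) with hvdef
  have hv : 0 ≤ v ∧ v ≤ pvR cs n i := by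
    by_cases hir : i ≤ r
    · set i' : Int := l + r - i + 1 with hi'def
      have hi'l : l ≤ i' := by omega
      have hi'i : i' ≤ i := by omega
      have hi'0 : 0 ≤ i' := by omega
      have hget : (PySem.List.pyGet? d i').getD 0 = d.getD i'.toNat 0 := by
        rw [PySem.List.pyGet?_of_nonneg d hi'0]
        simp [List.getD_eq_getElem?_getD]
      have hlt : i'.toNat < n.toNat := by omega
      have hentv : d.getD i'.toNat 0 = if ((i'.toNat : ℕ) : Int) < (m : Int) then pvR cs n i'.toNat else 0 :=
        hent i'.toNat hlt
      have hcast : ((i'.toNat : ℕ) : Int) = i' := by omega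
      rw [hcast] at hentv
      rcases eq_or_lt_of_le hi'i with hii | hii
      · have : d.getD i'.toNat 0 = 0 := by rw [hentv]; simp [hii, hidef]
        simp only [hvdef, hir, if_true, hget, this]
        constructor
        · omega
        · have := pvR_nonneg cs n i
          omega
      · have hstore : d.getD i'.toNat 0 = pvR cs n i' := by
          rw [hentv, if_pos (by omega)]
        simp only [hvdef, hir, if_true, hget, hstore]
        have hvR : min (r - i + 1) (pvR cs n i') ≤ pvR cs n i := by
          apply pvR_max
          intro k hk0 hkv
          have hk1 : k ≤ r - i := by omega
          have hk2 : k < pvR cs n i' := by omega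
          have hc' := pvR_cond cs n i' k hk0 hk2
          rw [pvCond_iff] at hc'
          obtain ⟨hb1, hb2, hc'⟩ := hc'
          rw [pvCond_iff]
          refine ⟨by omega, by omega, ?_⟩
          have e1 : cs.getD (i' - k - 1).toNat ' ' = cs.getD (i + k).toNat ' ' := by
            have h' := hpal' (i' - k - 1) (i + k) (by omega) (by omega) (by omega) (by omega) (by omega)
            exact h'
          have e3 : cs.getD (i - k - 1).toNat ' ' = cs.getD (i' + k).toNat ' ' := by
            exact hpal' (i - k - 1) (i' + k) (by omega) (by omega) (by omega) (by omega) (by omega)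
          rw [e3, ← hc', e1]
        refine ⟨?_, hvR⟩
        have := pvR_nonneg cs n i'
        omega
    · have hget : (PySem.List.pyGet? d i).getD 0 = d.getD i.toNat 0 := by
        rw [PySem.List.pyGet?_of_nonneg d hi0]
        simp [List.getD_eq_getElem?_getD]
      have hlt : i.toNat < n.toNat := by omega
      have hentv := hent i.toNat hlt
      have : d.getD i.toNat 0 = 0 := by rw [hentv]; simp [hidef]
      simp only [hvdef, hir, if_false, hget, this]
      exact ⟨le_refl 0, pvR_nonneg cs n i⟩
  have hv' : pvExpand cs n i v = pvR cs n i := pvExpand_absorb cs n i v hv.1 hv.2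
  have hdset : ∀ j : ℕ, j < n.toNat →
      (d.set i.toNat (pvR cs n i)).getD j 0 =
        if (j : Int) < (m : Int) + 1 then pvR cs n j else 0 := by
    intro j hj
    rw [List.getD_eq_getElem?_getD]
    by_cases hji : i.toNat = j
    · rw [hji, List.getElem?_set_self (by omega)]
      simp only [Option.getD_some]
      rw [if_pos (by omega)]
      congr 1
      omega
    · rw [List.getElem?_set_ne hji, ← List.getD_eq_getElem?_getD, hent j hj]
      have hiff : ((j : Int) < (m : Int) + 1) ↔ ((j : Int) < (m : Int)) := by omega
      simp only [hiff]
      rfl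
  show pvInv cs n (m + 1)
    (if i + pvExpand cs n i v - 1 > r
      then (d.set i.toNat (pvExpand cs n i v), i - pvExpand cs n i v, i + pvExpand cs n i v - 1)
      else (d.set i.toNat (pvExpand cs n i v), l, r))
  rw [hv']
  have hRl := pvR_left cs n i hi0
  have hRr := pvR_right cs n i hm
  have hR0 := pvR_nonneg cs n i
  by_cases hupd : i + pvR cs n i - 1 > r
  · rw [if_pos hupd]
    refine ⟨by simpa using hlen, hdset, by simp only; omega, by simp only; omega, by simp only; omega, ?_⟩
    intro p q hp1 hpq hq2 hs
    simp only at hp1 hpq hq2 hs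
    set k : Int := q - i with hkdef
    have hk0 : 0 ≤ k := by omega
    have hkR : k < pvR cs n i := by omega
    have hc := pvR_cond cs n i k hk0 hkR
    rw [pvCond_iff] at hc
    have hp : p = i - k - 1 := by omega
    have hq : q = i + k := by omega
    rw [hp, hq]
    exact hc.2.2
  · rw [if_neg hupd]
    exact ⟨by simpa using hlen, hdset, hl0, hrn, by simp only; omega, hpal⟩

theorem pvInv_at (cs : List Char) (n : Int) (hn : 0 ≤ n) :
    ∀ m : ℕ, m ≤ n.toNat → pvInv cs n m (pvStateAt cs n m) := by
  intro m
  induction m with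
  | zero =>
    intro _
    unfold pvStateAt
    rw [show ((0 : ℕ) : Int) = 0 from rfl, PySem.List.pyRange_one_eq_nil le_rfl]
    simp only [List.foldl_nil]
    refine ⟨List.length_replicate, ?_, le_rfl, by show (-1 : Int) < n; omega, by norm_num, ?_⟩
    · intro j hj
      simp [List.getD_eq_getElem?_getD, hj]
    · intro p q hp1 hpq hq2 hs
      simp only at hp1 hpq hq2
      omega
  | succ m ih =>
    intro hm
    have hinv := ih (by omega)
    rw [pvStateAt_succ]
    rcases hst : pvStateAt cs n m with ⟨d, l, r⟩
    rw [hst] at hinv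
    exact pvInv_step cs n m (by omega) d l r hinv

-- ===== B-side lemmas: pvCount is the common-prefix length =====

theorem pvCount_nonneg : ∀ (l r : List Char), 0 ≤ pvCount l r := by
  intro l
  induction l with
  | nil => intro r; simp [pvCount]
  | cons a as ih =>
    intro r
    cases r with
    | nil => simp [pvCount]
    | cons b bs =>
      rw [pvCount]
      split_ifs with h
      · have := ih bs; omega
      · omega

theorem pvCount_lt : ∀ (l r : List Char) (j : ℕ), (j : Int) < pvCount l r →
    j < l.length ∧ j < r.length ∧ l.getD j ' ' = r.getD j ' ' := by
  intro l
  induction l with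
  | nil => intro r j h; simp [pvCount] at h; omega
  | cons a as ih =>
    intro r j h
    cases r with
    | nil => simp [pvCount] at h; omega
    | cons b bs =>
      rw [pvCount] at h
      split_ifs at h with hab
      · cases j with
        | zero =>
          refine ⟨by simp, by simp, ?_⟩
          simpa using (beq_iff_eq.mp hab)
        | succ j =>
          have h' : (j : Int) < pvCount as bs := by push_cast at h ⊢; omega
          obtain ⟨h1, h2, h3⟩ := ih bs j h'
          exact ⟨by simpa using Nat.succ_lt_succ h1, by simpa using Nat.succ_lt_succ h2,
            by simpa using h3⟩
      · omega

theorem pvCount_ge : ∀ (l r : List Char) (k : ℕ), k ≤ l.length → k ≤ r.length →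
    (∀ j : ℕ, j < k → l.getD j ' ' = r.getD j ' ') → (k : Int) ≤ pvCount l r := by
  intro l
  induction l with
  | nil => intro r k hk _ _; simp at hk; simp [hk, pvCount]
  | cons a as ih =>
    intro r k hk1 hk2 hall
    cases k with
    | zero => exact pvCount_nonneg _ _
    | succ k =>
      cases r with
      | nil => simp at hk2
      | cons b bs =>
        have hab : a = b := by simpa using hall 0 (Nat.succ_pos k)
        rw [pvCount, if_pos (beq_iff_eq.mpr hab)]
        have := ih bs k (by simpa using hk1) (by simpa using hk2)
          (fun j hj => by simpa using hall (j + 1) (by omega))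
        push_cast
        omega

-- under Pre_, B's per-center count equals A's radius pvR
theorem pvCount_eq_pvR (cs : List Char) (n i : Int)
    (hi : 0 ≤ i) (hin : i < n) (hn : n ≤ (cs.length : Int)) :
    pvCount ((cs.take i.toNat).reverse) ((cs.drop i.toNat).take (n.toNat - i.toNat))
      = pvR cs n i := by
  set L := (cs.take i.toNat).reverse with hLdef
  set R := (cs.drop i.toNat).take (n.toNat - i.toNat) with hRdef
  have hLlen : L.length = i.toNat := by
    simp [hLdef]; omega
  have hRlen : R.length = n.toNat - i.toNat := by
    simp [hRdef]; omega
  have hLget : ∀ j : ℕ, j < i.toNat → L.getD j ' ' = cs.getD (i.toNat - 1 - j) ' ' := by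
    intro j hj
    have hjL : j < L.length := by omega
    have hcs : i.toNat - 1 - j < cs.length := by omega
    rw [List.getD_eq_getElem?_getD, List.getElem?_eq_getElem hjL,
        List.getD_eq_getElem?_getD, List.getElem?_eq_getElem hcs]
    simp only [Option.getD_some, hLdef]
    rw [List.getElem_reverse, List.getElem_take]
    congr 1
    simp
    omega
  have hRget : ∀ j : ℕ, j < n.toNat - i.toNat → R.getD j ' ' = cs.getD (i.toNat + j) ' ' := by
    intro j hj
    have hjR : j < R.length := by omega
    have hcs : i.toNat + j < cs.length := by omega
    rw [List.getD_eq_getElem?_getD, List.getElem?_eq_getElem hjR,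
        List.getD_eq_getElem?_getD, List.getElem?_eq_getElem hcs]
    simp only [Option.getD_some, hRdef]
    rw [List.getElem_take, List.getElem_drop]
  apply le_antisymm
  · apply pvR_max
    intro k hk0 hklt
    obtain ⟨h1, h2, h3⟩ := pvCount_lt L R k.toNat (by omega)
    rw [hLlen] at h1
    rw [hRlen] at h2
    rw [hLget k.toNat h1, hRget k.toNat h2] at h3
    rw [pvCond_iff]
    refine ⟨by omega, by omega, ?_⟩
    have e1 : (i - k - 1).toNat = i.toNat - 1 - k.toNat := by omega
    have e2 : (i + k).toNat = i.toNat + k.toNat := by omega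
    rw [e1, e2]
    exact h3
  · have hR0 := pvR_nonneg cs n i
    have hRl := pvR_left cs n i hi
    have hRr := pvR_right cs n i hin
    have := pvCount_ge L R (pvR cs n i).toNat (by omega) (by omega) ?_
    · omega
    · intro j hj
      have hc := pvR_cond cs n i (j : Int) (by positivity) (by omega)
      rw [pvCond_iff] at hc
      obtain ⟨h1, h2, h3⟩ := hc
      rw [hLget j (by omega), hRget j (by omega)]
      have e1 : (i - (j:Int) - 1).toNat = i.toNat - 1 - j := by omega
      have e2 : (i + (j:Int)).toNat = i.toNat + j := by omega
      rw [e1, e2] at h3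
      exact h3

-- ===== VERDICT (by name: the statements are the Claim_ definitions above) =====
theorem manacher_even_spec : Claim_equal_manacher_even := by
  intro string n _ hpre
  unfold Spec_manacher_even manacher_even manacher_even_alt
  set cs := string.toList with hcs
  by_cases hn : 0 ≤ n
  · have hfold : (PySem.List.pyRange 0 n 1).foldl (pvStepA cs n) (List.replicate n.toNat 0, 0, -1)
        = pvStateAt cs n n.toNat := by
      unfold pvStateAt
      rw [Int.toNat_of_nonneg hn]
    rw [hfold]
    obtain ⟨hlen, hent, -⟩ := pvInv_at cs n hn n.toNat le_rfl
    apply List.ext_getElem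
    · simp [hlen, PySem.List.length_pyRange_one]
    · intro k hk1 hk2
      have hkn : k < n.toNat := by
        simpa [PySem.List.length_pyRange_one] using hk2
      rw [List.getElem_map, PySem.List.getElem_pyRange_one]
      have hA := hent k hkn
      rw [List.getD_eq_getElem?_getD, List.getElem?_eq_getElem hk1] at hA
      simp only [Option.getD_some] at hA
      rw [hA, if_pos (by omega)]
      rw [show (0:Int) + (k:Int) = (k:Int) from zero_add _]
      rw [PySem.List.slice_to cs (by positivity), PySem.List.slice_toNat cs (by positivity) hn]
      have hpre' : n ≤ (cs.length : Int) := hpre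
      have := pvCount_eq_pvR cs n (k:Int) (by positivity) (by omega) hpre'
      rw [show ((k:Int)).toNat = k from by omega] at this
      exact this.symm
  · have hn0 : n ≤ 0 := by omega
    rw [PySem.List.pyRange_one_eq_nil hn0]
    simp
    omega
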